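-- pv_equiv track=rewrite | github.com/ginkorea/ml_tools | final.py | count
-- ===== SOURCE A (Python) =====
-- def count(matrix, column, attribute, class_index=3):
--     dont = 0
--     take = 0
--     for row in matrix:
--         if row[column] == attribute:
--             if row[class_index] == 0:
--                 dont += 1
--             else:
--                 take += 1
--     total_set = take + dont
--     return total_set, dont, take
-- ===== SOURCE B (Python) =====
-- def count(matrix, column, attribute, class_index=3):
--     matched = [row for row in matrix if row[column] == attribute]
--     take = sum(1 for row in matched if row[class_index] != 0)
--     dont = len(matched) - take
--     return len(matched), dont, take
-- ===== Notes on version B (the rewrite author's own statement) =====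
-- stated objective: alternative
-- what changed: Replaces A's single pass with two parallel counters by a filter-then-count decomposition: build the matched rows, count the nonzero-class ones, and derive dont and the total by arithmetic.
import Mathlib
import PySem

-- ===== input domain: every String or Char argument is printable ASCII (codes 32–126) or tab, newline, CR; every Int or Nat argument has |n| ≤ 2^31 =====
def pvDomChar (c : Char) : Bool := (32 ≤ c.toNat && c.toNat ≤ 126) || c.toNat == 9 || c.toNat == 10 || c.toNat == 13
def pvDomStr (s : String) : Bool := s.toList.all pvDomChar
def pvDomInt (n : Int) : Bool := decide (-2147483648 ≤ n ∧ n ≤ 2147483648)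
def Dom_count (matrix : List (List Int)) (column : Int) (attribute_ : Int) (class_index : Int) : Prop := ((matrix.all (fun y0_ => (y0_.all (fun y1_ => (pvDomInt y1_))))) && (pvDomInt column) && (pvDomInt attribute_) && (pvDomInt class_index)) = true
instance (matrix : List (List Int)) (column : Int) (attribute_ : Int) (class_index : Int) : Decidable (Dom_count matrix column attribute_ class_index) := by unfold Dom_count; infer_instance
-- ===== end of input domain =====

-- B rewrites A's single pass with two parallel if/else counters as a filter-then-count
-- decomposition (matched rows, then take; dont and the total by arithmetic); alternative, same cost.

-- ===== PORT A =====
-- single left-to-right pass carrying the pair (dont, take); none from pyGet? (IndexError in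
-- Python) is excluded by Pre_count
def count (matrix : List (List Int)) (column : Int) (attribute_ : Int) (class_index : Int) : Int × Int × Int :=
  let st := matrix.foldl (fun (st : Int × Int) row =>
    if PySem.List.pyGet? row column = some attribute_ then
      if PySem.List.pyGet? row class_index = some 0 then (st.1 + 1, st.2)
      else (st.1, st.2 + 1)
    else st) (0, 0)
  (st.2 + st.1, st.1, st.2)

-- ===== PORT B =====
def count_alt (matrix : List (List Int)) (column : Int) (attribute_ : Int) (class_index : Int) : Int × Int × Int :=
  let matched := matrix.filter (fun row => PySem.List.pyGet? row column == some attribute_)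
  let take : Int := (matched.countP (fun row => !(PySem.List.pyGet? row class_index == some 0)) : Int)
  let dont : Int := (matched.length : Int) - take
  ((matched.length : Int), dont, take)

-- ===== PRECONDITION & SPEC =====
-- Pre_count excludes exactly the inputs where Python A raises IndexError: some row lacks
-- index `column`, or some matching row lacks index `class_index`.
def Pre_count (matrix : List (List Int)) (column : Int) (attribute_ : Int) (class_index : Int) : Prop :=
  ∀ row ∈ matrix, PySem.Raise.InRange row.length column ∧
    (PySem.List.pyGet? row column = some attribute_ → PySem.Raise.InRange row.length class_index)
instance (matrix : List (List Int)) (column : Int) (attribute_ : Int) (class_index : Int) : Decidable (Pre_count matrix column attribute_ class_index) := by unfold Pre_count; infer_instance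
def pvWitness_count : List (List Int) × Int × Int × Int := ([[1, 0], [1, 5], [2, 0]], 0, 1, 1)
def Spec_count (matrix : List (List Int)) (column : Int) (attribute_ : Int) (class_index : Int) (out : Int × Int × Int) : Prop := out = count_alt matrix column attribute_ class_index
instance (matrix : List (List Int)) (column : Int) (attribute_ : Int) (class_index : Int) (out : Int × Int × Int) : Decidable (Spec_count matrix column attribute_ class_index out) := by unfold Spec_count; infer_instance

-- ===== CLAIM (what is proved, stated in full; the proofs are below) =====
def Claim_equal_count : Prop := ∀ (matrix : List (List Int)) (column : Int) (attribute_ : Int) (class_index : Int), Dom_count matrix column attribute_ class_index → Pre_count matrix column attribute_ class_index → Spec_count matrix column attribute_ class_index (count matrix column attribute_ class_index)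

-- ===== LEMMAS AND PROOFS =====

-- loop invariant: A's fold from accumulator (d, t) adds the dont/take counts of the matched rows
theorem count_loop_eq (column attribute_ class_index : Int) :
    ∀ (m : List (List Int)) (d t : Int),
      m.foldl (fun (st : Int × Int) row =>
        if PySem.List.pyGet? row column = some attribute_ then
          if PySem.List.pyGet? row class_index = some 0 then (st.1 + 1, st.2)
          else (st.1, st.2 + 1)
        else st) (d, t) =
      (d + ((m.filter (fun row => PySem.List.pyGet? row column == some attribute_)).countP
              (fun row => PySem.List.pyGet? row class_index == some 0) : Int),
       t + ((m.filter (fun row => PySem.List.pyGet? row column == some attribute_)).countP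
              (fun row => !(PySem.List.pyGet? row class_index == some 0)) : Int)) := by
  intro m
  induction m with
  | nil => intro d t; simp
  | cons r m ih =>
    intro d t
    by_cases hc : PySem.List.pyGet? r column = some attribute_
    · by_cases hz : PySem.List.pyGet? r class_index = some 0 <;>
        simp [hc, hz, ih, List.countP_cons] <;> push_cast <;> ring
    · simp [hc, ih]

theorem count_spec_aux (matrix : List (List Int)) (column attribute_ class_index : Int) :
    count matrix column attribute_ class_index = count_alt matrix column attribute_ class_index := by
  unfold count count_alt
  rw [count_loop_eq]
  have hlen : (matrix.filter (fun row => PySem.List.pyGet? row column == some attribute_)).length =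
      (matrix.filter (fun row => PySem.List.pyGet? row column == some attribute_)).countP
        (fun row => PySem.List.pyGet? row class_index == some 0) +
      (matrix.filter (fun row => PySem.List.pyGet? row column == some attribute_)).countP
        (fun row => !(PySem.List.pyGet? row class_index == some 0)) := by
    rw [Nat.add_comm, List.length_eq_countP_add_countP
      (fun row => !(PySem.List.pyGet? row class_index == some 0))]
    congr 1
    · apply List.countP_congr; intro r _; simp
  refine Prod.ext ?_ (Prod.ext ?_ ?_) <;> simp [hlen] <;> push_cast <;> ring

-- ===== VERDICT (by name: the statement is the Claim_ definition above) =====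
theorem count_spec : Claim_equal_count := by
  intro matrix column attribute_ class_index _ _
  exact count_spec_aux matrix column attribute_ class_index
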